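-- pv_equiv track=rewrite | github.com/myychal/aoc2021 | day18/main.py | check_magnitude
-- ===== SOURCE A (Python) =====
-- from typing import List
--
-- def check_magnitude(snail: List[str]):
--     while 1:
--         reduced_in_loop = False
--         for idx, character in enumerate(snail[:-2]):
--             if character.isdigit() and snail[idx + 2].isdigit():
--                 pair_magnitude = int(character) * 3 + int(snail[idx + 2]) * 2
--                 snail = snail[:idx - 1] + [str(pair_magnitude)] + snail[
--                                                                   idx + 4:]
--                 reduced_in_loop = True
--                 break
--         if not reduced_in_loop:
--             break
--     return snail
-- ===== SOURCE B (Python) =====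
-- from typing import List
--
--
-- def check_magnitude(snail: List[str]):
--     # Single pass with an explicit stack: push tokens; whenever the top of the
--     # stack reads "[", digits, ",", digits, "]", collapse it to 3*a + 2*b.
--     stack = []
--     for tok in snail:
--         stack.append(tok)
--         if len(stack) >= 5 and stack[-5] == "[" and stack[-4].isdigit() \
--                 and stack[-3] == "," and stack[-2].isdigit() and stack[-1] == "]":
--             magnitude = 3 * int(stack[-4]) + 2 * int(stack[-2])
--             stack[-5:] = [str(magnitude)]
--     return stack
-- ===== Notes on version B (the rewrite author's own statement) =====
-- stated objective: alternative
-- what changed: A repeatedly rescans the token list from the start and splices out one digit pair per while-iteration; B makes a single left-to-right pass with an explicit stack, collapsing each '[d1,d2]' to str(3*d1+2*d2) the moment its closing bracket is pushed.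
-- outside the precondition, e.g. on check_magnitude(['x', '1', ',', '2', 'y']): A returns ['7'], B returns ['x', '1', ',', '2', 'y']
import Mathlib
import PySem

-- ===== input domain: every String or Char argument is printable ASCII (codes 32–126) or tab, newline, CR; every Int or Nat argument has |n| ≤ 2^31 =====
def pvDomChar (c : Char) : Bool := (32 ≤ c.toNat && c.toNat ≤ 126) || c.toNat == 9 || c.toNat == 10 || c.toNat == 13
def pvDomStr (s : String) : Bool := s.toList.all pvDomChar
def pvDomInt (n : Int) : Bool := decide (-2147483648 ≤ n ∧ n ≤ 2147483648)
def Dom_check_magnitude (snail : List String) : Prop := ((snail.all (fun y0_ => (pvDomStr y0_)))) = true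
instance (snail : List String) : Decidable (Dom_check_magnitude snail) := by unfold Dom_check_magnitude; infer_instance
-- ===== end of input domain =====

-- B replaces A's restart-the-scan-after-every-splice loop by a single left-to-right pass
-- with an explicit stack that collapses each digit pair when its closing bracket is pushed.

-- shared primitives: Python's s.isdigit() and int(s) on a digit string (A and B both use them)
def pvDig (s : String) : Bool := PySem.Str.strIsdigit s
def pvVal (s : String) : Int := (PySem.Int.ofStr? s).getD 0

-- ===== PORT A =====
-- while 1: scan enumerate(snail[:-2]) for the first idx with digits at idx and idx+2,
-- splice snail[:idx-1] + [str(3*a+2*b)] + snail[idx+4:], else stop.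
-- The fuel only bounds the number of while-iterations; on Pre_ inputs every iteration
-- shortens the list by 4, so snail.length + 1 iterations are never exhausted.
def pvLoopA : Nat → List String → List String
  | 0, snail => snail
  | fuel + 1, snail =>
    match (PySem.List.enumerate (PySem.List.slice snail none (some (-2)))).find?
        (fun ic => pvDig ic.2 && pvDig ((PySem.List.pyGet? snail (ic.1 + 2)).getD "")) with
    | none => snail
    | some (idx, character) =>
      let pair_magnitude := pvVal character * 3 + pvVal ((PySem.List.pyGet? snail (idx + 2)).getD "") * 2
      pvLoopA fuel (PySem.List.slice snail none (some (idx - 1)) ++ [PySem.Int.toStr pair_magnitude]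
                    ++ PySem.List.slice snail (some (idx + 4)) none)

def check_magnitude (snail : List String) : List String := pvLoopA (snail.length + 1) snail

-- ===== PORT B =====
def pvG (st : List String) (i : Int) : String := (PySem.List.pyGet? st i).getD ""

def pvStepB (stack : List String) (tok : String) : List String :=
  let st := stack ++ [tok]
  if decide (5 ≤ st.length) && (pvG st (-5) == "[") && pvDig (pvG st (-4))
      && (pvG st (-3) == ",") && pvDig (pvG st (-2)) && (pvG st (-1) == "]") then
    PySem.List.slice st none (some (-5))
      ++ [PySem.Int.toStr (3 * pvVal (pvG st (-4)) + 2 * pvVal (pvG st (-2)))]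
  else st

def check_magnitude_alt (snail : List String) : List String := snail.foldl pvStepB []

-- ===== PRECONDITION & SPEC =====
-- pvParse fuel l: consume one well-formed snailfish expression (a digit token, or
-- '[' expr ',' expr ']') from the front of l, returning the rest; fuel ≥ length suffices.
def pvParse : Nat → List String → Option (List String)
  | 0, _ => none
  | _ + 1, [] => none
  | fuel + 1, t :: rest =>
    if pvDig t then some rest
    else if t = "[" then
      match pvParse fuel rest with
      | some ("," :: r2) =>
        match pvParse fuel r2 with
        | some ("]" :: r3) => some r3
        | _ => none
      | _ => none
    else none

def pvHasPair (snail : List String) : Bool :=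
  (List.range snail.length).any (fun i =>
    decide (i + 2 < snail.length) && pvDig (snail.getD i "") && pvDig (snail.getD (i + 2) ""))

-- Pre_ excludes token lists that contain a digit pair at distance two without being a
-- well-formed snailfish number: there A's splice arithmetic silently drops unrelated
-- neighbouring tokens, or loops forever once such a pair reaches the head of the list.
def Pre_check_magnitude (snail : List String) : Prop :=
  pvParse (snail.length + 1) snail = some [] ∨ pvHasPair snail = false
instance (snail : List String) : Decidable (Pre_check_magnitude snail) := by
  unfold Pre_check_magnitude; infer_instance

def pvWitness_check_magnitude : List String := ["[", "[", "1", ",", "2", "]", ",", "3", "]"]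

def Spec_check_magnitude (snail : List String) (out : List String) : Prop := out = check_magnitude_alt snail
instance (snail : List String) (out : List String) : Decidable (Spec_check_magnitude snail out) := by unfold Spec_check_magnitude; infer_instance

-- ===== CLAIM (what is proved, stated in full; the proofs are below) =====
def Claim_equal_check_magnitude : Prop := ∀ (snail : List String), Dom_check_magnitude snail → Pre_check_magnitude snail → Spec_check_magnitude snail (check_magnitude snail)

-- ===== LEMMAS AND PROOFS =====

-- well-formed snailfish token lists
inductive pvSF : List String → Prop
  | leaf (d : String) (h : pvDig d = true) : pvSF [d]
  | pair (a b : List String) (ha : pvSF a) (hb : pvSF b) :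
      pvSF ("[" :: a ++ "," :: b ++ ["]"])

theorem pvParse_sound : ∀ (fuel : Nat) (l r : List String),
    pvParse fuel l = some r → ∃ e, pvSF e ∧ l = e ++ r := by
  intro fuel
  induction fuel with
  | zero => intro l r h; simp [pvParse] at h
  | succ f ih =>
    intro l r h
    match l with
    | [] => simp [pvParse] at h
    | t :: rest =>
      simp only [pvParse] at h
      by_cases hd : pvDig t = true
      · rw [if_pos hd] at h
        obtain rfl : rest = r := by simpa using h
        exact ⟨[t], pvSF.leaf t hd, rfl⟩
      · rw [if_neg hd] at h
        by_cases hb : t = "["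
        · rw [if_pos hb] at h
          subst hb
          split at h
          · rename_i r2 heq1
            split at h
            · rename_i r3 heq2
              obtain rfl : r3 = r := by simpa using h
              obtain ⟨e1, he1, hrest⟩ := ih rest _ heq1
              obtain ⟨e2, he2, hr2⟩ := ih r2 _ heq2
              refine ⟨"[" :: e1 ++ "," :: e2 ++ ["]"], pvSF.pair e1 e2 he1 he2, ?_⟩
              subst hrest hr2
              simp
            · simp at h
          · simp at h
        · rw [if_neg hb] at h
          simp at h

-- digit-token facts
theorem pvChar_digit (c : Char) (h : PySem.Chars.isdigit c = true) : PySem.Int.isIntSpace c = false ∧ c ≠ '-' ∧ c ≠ '+' := by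
  simp [PySem.Chars.isdigit] at h
  refine ⟨?_, ?_, ?_⟩
  · by_contra hsp
    rw [Bool.not_eq_false] at hsp
    simp [PySem.Int.isIntSpace] at hsp
    rcases hsp with ((((rfl|rfl)|rfl)|rfl)|rfl)|rfl <;> exact absurd h (by decide)
  · rintro rfl; exact absurd h (by decide)
  · rintro rfl; exact absurd h (by decide)

theorem pvAux1 (X : Option Nat) : 0 ≤ ((do let a ← X; pure ((a : Int)) : Option Int).map (fun n => n)).getD 0 := by
  cases X <;> simp

theorem pvDropWhileDigits (l : List Char) (hl2 : ∀ x ∈ l, PySem.Chars.isdigit x = true) :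
    l.dropWhile PySem.Int.isIntSpace = l := by
  cases l with
  | nil => rfl
  | cons a u =>
    rw [List.dropWhile_cons_of_neg]
    simp [(pvChar_digit a (hl2 a (by simp))).1]

theorem pvValList (l : List Char) (hall : ∀ x ∈ l, PySem.Chars.isdigit x = true) :
    0 ≤ (PySem.Int.ofChars? l).getD 0 := by
  simp only [PySem.Int.ofChars?]
  rw [pvDropWhileDigits l hall,
    pvDropWhileDigits _ (by intro x hx; exact hall x (List.mem_reverse.mp hx)),
    List.reverse_reverse]
  split
  · exact absurd (hall '-' (by simp)) (by decide)
  · exact absurd (hall '+' (by simp)) (by decide)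
  · exact pvAux1 _

theorem pvVal_nonneg (s : String) (h : pvDig s = true) : 0 ≤ pvVal s := by
  have hl : PySem.Chars.strIsdigit s.toList = true := h
  simp only [PySem.Chars.strIsdigit, Bool.and_eq_true, List.all_eq_true, Bool.not_eq_true',
    List.isEmpty_eq_false_iff] at hl
  exact pvValList s.toList hl.2

theorem pvDig_toStr (n : Int) (h : 0 ≤ n) : pvDig (PySem.Int.toStr n) = true := by
  unfold pvDig
  rw [PySem.Str.strIsdigit_eq, PySem.Int.toStr, String.toList_ofList, PySem.Int.toChars,
    if_neg (by omega)]
  simp only [PySem.Chars.strIsdigit, Bool.and_eq_true, List.all_eq_true, Bool.not_eq_true',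
    List.isEmpty_eq_false_iff]
  refine ⟨by have := @Nat.length_toDigits_pos 10 n.toNat; intro hc; rw [hc] at this; simp at this, ?_⟩
  intro c hc
  have hd : c.isDigit = true := Nat.isDigit_of_mem_toDigits (by norm_num) (by norm_num) hc
  simp [PySem.Chars.isdigit, Char.isDigit, Char.le_def] at *
  omega

theorem pvDig_ne (s : String) (h : pvDig s = true) : s ≠ "[" ∧ s ≠ "," ∧ s ≠ "]" := by
  refine ⟨?_, ?_, ?_⟩ <;> rintro rfl <;> exact absurd h (by decide)

-- the scan of A's for-loop, as a structural recursion used only in proofs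
def pvScan3 : List String → Option Nat
  | [] => none
  | x :: t =>
    if pvDig x && pvDig (t.getD 1 "") && decide (2 ≤ t.length) then some 0
    else (pvScan3 (t)).map (· + 1)

theorem pvScan3_short (s : List String) (h : s.length < 3) : pvScan3 s = none := by
  match s with
  | [] => rfl
  | x :: t =>
    have ht : t.length < 3 := by simp at h; omega
    have h2 : ¬ (2 ≤ t.length) := by simp at h; omega
    simp [pvScan3, h2, pvScan3_short t ht]

theorem pvFind_eq_scan3 : ∀ (s : List String), ∀ (k : Nat) (full : List String), full.drop k = s →
    (PySem.List.enumerate (PySem.List.slice s none (some (-2))) (k : Int)).find?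
        (fun ic => pvDig ic.2 && pvDig ((PySem.List.pyGet? full (ic.1 + 2)).getD "")) =
      (pvScan3 s).map (fun n => (((k + n : Nat) : Int), s.getD n "")) := by
  intro s
  induction s with
  | nil =>
    intro k full h
    rw [PySem.List.slice_to_neg_ofNat _ 2 (by omega)]
    simp [pvScan3]
  | cons x t ih =>
    intro k full h
    by_cases hlen : 2 ≤ t.length
    · have hslice : PySem.List.slice (x :: t) none (some (-2)) =
          x :: PySem.List.slice t none (some (-2)) := by
        rw [PySem.List.slice_to_neg_ofNat _ 2 (by omega), PySem.List.slice_to_neg_ofNat _ 2 (by omega)]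
        simp only [List.length_cons]
        rw [show t.length + 1 - 2 = (t.length - 2) + 1 by omega]
        rw [List.take_succ_cons]
      have hval : (PySem.List.pyGet? full ((k : Int) + 2)).getD "" = t.getD 1 "" := by
        rw [show ((k : Int) + 2) = ((k + 2 : Nat) : Int) by push_cast; ring]
        rw [PySem.List.pyGet?_natCast]
        rw [show k + 2 = k + 2 by rfl]
        have : full[k + 2]? = (full.drop k)[2]? := by
          rw [List.getElem?_drop]
        rw [this, h]
        simp [List.getD_eq_getElem?_getD]
      rw [hslice, PySem.List.enumerate_cons]
      by_cases hc : (pvDig x && pvDig (t.getD 1 "")) = true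
      · rw [List.find?_cons_of_pos (by simpa [hval] using hc)]
        have : pvScan3 (x :: t) = some 0 := by
          simp only [pvScan3]
          rw [if_pos (by simp only [Bool.and_eq_true, decide_eq_true_eq] at hc ⊢; exact ⟨hc, hlen⟩)]
        simp [this]
      · rw [List.find?_cons_of_neg (by simpa [hval] using hc)]
        have hdrop : full.drop (k + 1) = t := by
          have h2 := congrArg (List.drop 1) h
          rw [List.drop_drop] at h2
          simpa using h2
        have := ih (k + 1) full hdrop
        rw [show ((k : Int) + 1) = ((k + 1 : Nat) : Int) by push_cast; ring]
        rw [this]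
        have hsc : pvScan3 (x :: t) = (pvScan3 t).map (· + 1) := by
          simp only [pvScan3]
          exact if_neg (fun hcc => by
            rw [Bool.and_eq_true, Bool.and_eq_true] at hcc
            exact hc (by rw [hcc.1.1, hcc.1.2]; rfl))
        rw [hsc]
        cases hst : pvScan3 t with
        | none => simp
        | some n =>
          simp only [Option.map_some]
          congr 1
          refine Prod.ext ?_ ?_
          · simp; omega
          · simp
    · rw [PySem.List.slice_to_neg_ofNat _ 2 (by omega)]
      rw [show (x :: t).length - 2 = 0 by simp; omega, List.take_zero]
      rw [pvScan3_short _ (by simp; omega)]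
      simp [PySem.List.enumerate]

-- "no digit pair strictly before position k"
def pvNPB (s : List String) (k : Nat) : Prop :=
  ∀ i, i < k → i + 2 < s.length → ¬(pvDig (s.getD i "") = true ∧ pvDig (s.getD (i + 2) "") = true)

theorem pvScan3_of_decomp : ∀ (l : List String) (s : List String) (d1 c d2 : String) (r : List String),
    s = l ++ d1 :: c :: d2 :: r → pvDig d1 = true → pvDig d2 = true → pvNPB s l.length →
    pvScan3 s = some l.length := by
  intro l
  induction l with
  | nil =>
    intro s d1 c d2 r hs h1 h2 _
    subst hs
    simp only [List.nil_append, pvScan3]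
    rw [if_pos (by rw [h1, show (c :: d2 :: r).getD 1 "" = d2 from rfl, h2]; simp)]
    simp
  | cons a l' ih =>
    intro s d1 c d2 r hs h1 h2 hnpb
    subst hs
    have hc : ¬(pvDig a && pvDig ((l' ++ d1 :: c :: d2 :: r).getD 1 "") &&
        decide (2 ≤ (l' ++ d1 :: c :: d2 :: r).length)) = true := by
      intro hcc
      rw [Bool.and_eq_true, Bool.and_eq_true] at hcc
      refine hnpb 0 (by simp) (by simp; omega) ⟨?_, ?_⟩
      · simpa using hcc.1.1
      · rw [List.cons_append, show (2:Nat) = 1 + 1 from rfl, List.getD_cons_succ]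
        exact hcc.1.2
    have hnpb' : pvNPB (l' ++ d1 :: c :: d2 :: r) l'.length := by
      intro i hi hib hpair
      refine hnpb (i + 1) (by simpa using Nat.succ_lt_succ hi) (by simp at hib ⊢; omega) ⟨?_, ?_⟩
      · rw [List.cons_append, List.getD_cons_succ]; exact hpair.1
      · rw [List.cons_append, show i + 1 + 2 = (i + 2) + 1 from rfl, List.getD_cons_succ]
        exact hpair.2
    simp only [List.cons_append, pvScan3]
    rw [if_neg hc, ih _ d1 c d2 r rfl h1 h2 hnpb']
    simp

theorem pvHasPair_iff (s : List String) : pvHasPair s = true ↔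
    ∃ i, i + 2 < s.length ∧ pvDig (s.getD i "") = true ∧ pvDig (s.getD (i + 2) "") = true := by
  constructor
  · intro h
    simp only [pvHasPair, List.any_eq_true, List.mem_range, Bool.and_eq_true, decide_eq_true_eq] at h
    obtain ⟨i, _, ⟨h2, hd1⟩, hd2⟩ := h
    exact ⟨i, h2, hd1, hd2⟩
  · rintro ⟨i, h2, hd1, hd2⟩
    simp only [pvHasPair, List.any_eq_true, List.mem_range, Bool.and_eq_true, decide_eq_true_eq]
    exact ⟨i, by omega, ⟨h2, hd1⟩, hd2⟩

theorem pvScan3_none (s : List String) (h : pvHasPair s = false) : pvScan3 s = none := by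
  match s with
  | [] => rfl
  | x :: t =>
    have hnp : ¬ ∃ i, i + 2 < (x :: t).length ∧ pvDig ((x :: t).getD i "") = true ∧
        pvDig ((x :: t).getD (i + 2) "") = true := by
      intro hp
      rw [← pvHasPair_iff] at hp
      simp [hp] at h
    have hc : ¬ (pvDig x = true ∧ pvDig (t.getD 1 "") = true ∧ 2 ≤ t.length) := by
      rintro ⟨a, b, c⟩
      exact hnp ⟨0, by simp; omega, by simpa, by simpa using b⟩
    have ht : pvHasPair t = false := by
      by_contra hb
      rw [Bool.not_eq_false, pvHasPair_iff] at hb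
      obtain ⟨i, hlen, hd1, hd2⟩ := hb
      exact hnp ⟨i + 1, by simp; omega, by simpa, by simpa using hd2⟩
    have hcb : (pvDig x && pvDig (t.getD 1 "") && decide (2 ≤ t.length)) = false := by
      by_cases hx : pvDig x = true
      · by_cases hy : pvDig (t.getD 1 "") = true
        · have hl : ¬ 2 ≤ t.length := fun hl => hc ⟨hx, hy, hl⟩
          rw [hx, hy]
          simp
          omega
        · rw [Bool.not_eq_true] at hy
          rw [hy]
          simp
      · rw [Bool.not_eq_true] at hx
        rw [hx]
        simp
    simp only [pvScan3]
    rw [hcb]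
    simp [pvScan3_none t ht]

-- SF head shape
theorem pvSF_head (s : List String) (h : pvSF s) :
    (∃ d, s = [d] ∧ pvDig d = true) ∨ ∃ t, s = "[" :: t := by
  cases h with
  | leaf d hd => exact Or.inl ⟨d, rfl, hd⟩
  | pair a b ha hb => exact Or.inr ⟨_, rfl⟩

-- the central decomposition: a non-leaf SF list has a leftmost digit pair, it sits inside
-- a bracketed pair, and contracting it yields an SF list again
theorem pvSF_cases (s : List String) (h : pvSF s) :
    (∃ d, s = [d] ∧ pvDig d = true) ∨
    ∃ l d1 d2 r, s = l ++ "[" :: d1 :: "," :: d2 :: "]" :: r ∧ pvDig d1 = true ∧ pvDig d2 = true ∧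
      pvSF (l ++ PySem.Int.toStr (3 * pvVal d1 + 2 * pvVal d2) :: r) ∧ pvNPB s (l.length + 1) := by
  induction h with
  | leaf d hd => exact Or.inl ⟨d, rfl, hd⟩
  | pair a b ha hb iha ihb =>
    right
    rcases iha with ⟨d1, rfl, hd1⟩ | ⟨la, e1, e2, ra, hadec, he1, he2, hsfa, hnpa⟩
    · rcases ihb with ⟨d2, rfl, hd2⟩ | ⟨lb, f1, f2, rb, hbdec, hf1, hf2, hsfb, hnpb⟩
      · refine ⟨[], d1, d2, [], by simp, hd1, hd2, ?_, ?_⟩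
        · simpa using pvSF.leaf _ (pvDig_toStr _
            (by have := pvVal_nonneg _ hd1; have := pvVal_nonneg _ hd2; omega))
        · intro i hi hlen hp
          obtain rfl : i = 0 := by simp at hi; omega
          exact absurd (by simpa using hp.1) (by decide)
      · obtain ⟨tb, hbhead⟩ : ∃ t, b = "[" :: t := by
          rcases pvSF_head b hb with ⟨d, hbd, _⟩ | h'
          · rw [hbd] at hbdec
            have := congrArg List.length hbdec
            simp at this
            omega
          · exact h'
        have hblen : b.length = lb.length + 5 + rb.length := by rw [hbdec]; simp; omega
        refine ⟨"[" :: d1 :: "," :: lb, f1, f2, rb ++ ["]"], ?_, hf1, hf2, ?_, ?_⟩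
        · rw [hbdec]; simp
        · have := pvSF.pair [d1] (lb ++ PySem.Int.toStr (3 * pvVal f1 + 2 * pvVal f2) :: rb)
            (pvSF.leaf d1 hd1) hsfb
          simpa using this
        · intro i hi hlen hp
          have hs0 : ("[" :: [d1] ++ "," :: b ++ ["]"]) = "[" :: d1 :: "," :: (b ++ ["]"]) := by simp
          rw [hs0] at hp hlen
          simp only [List.length_cons] at hi hlen
          rcases i with _|(_|(_|j))
          · exact absurd (by simpa using hp.1) (by decide)
          · have h3 : ("[" :: d1 :: "," :: (b ++ ["]"])).getD 3 "" = "[" := by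
              rw [show (3:Nat) = 2 + 1 from rfl, List.getD_cons_succ, List.getD_cons_succ,
                List.getD_cons_succ, List.getD_append _ _ _ _ (by rw [hbhead]; simp), hbhead]
              rfl
            rw [show (1:Nat) + 2 = 3 from rfl, h3] at hp
            exact absurd hp.2 (by decide)
          · exact absurd (by simpa using hp.1) (by decide)
          · have hj : j < lb.length + 1 := by omega
            have hv1 : ("[" :: d1 :: "," :: (b ++ ["]"])).getD (j + 3) "" = b.getD j "" := by
              rw [show j + 3 = (j + 2) + 1 from rfl, List.getD_cons_succ,
                show j + 2 = (j + 1) + 1 from rfl, List.getD_cons_succ, List.getD_cons_succ,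
                List.getD_append _ _ _ _ (by omega)]
            have hv2 : ("[" :: d1 :: "," :: (b ++ ["]"])).getD (j + 3 + 2) "" = b.getD (j + 2) "" := by
              rw [show j + 3 + 2 = (j + 4) + 1 from rfl, List.getD_cons_succ,
                show j + 4 = (j + 3) + 1 from rfl, List.getD_cons_succ,
                show j + 3 = (j + 2) + 1 from rfl, List.getD_cons_succ,
                List.getD_append _ _ _ _ (by omega)]
            rw [hv1, hv2] at hp
            exact hnpb j hj (by omega) hp
    · have halen : a.length = la.length + 5 + ra.length := by rw [hadec]; simp; omega
      refine ⟨"[" :: la, e1, e2, ra ++ "," :: b ++ ["]"], ?_, he1, he2, ?_, ?_⟩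
      · rw [hadec]; simp
      · have := pvSF.pair (la ++ PySem.Int.toStr (3 * pvVal e1 + 2 * pvVal e2) :: ra) b hsfa hb
        simpa using this
      · intro i hi hlen hp
        simp only [List.length_cons] at hi hlen
        rcases i with _|j
        · exact absurd (by simpa using hp.1) (by decide)
        · have hj : j < la.length + 1 := by omega
          have hv1 : ("[" :: a ++ "," :: b ++ ["]"]).getD (j + 1) "" = a.getD j "" := by
            rw [List.getD_append _ _ _ _ (by simp; omega),
              List.getD_append _ _ _ _ (by simp; omega), List.getD_cons_succ]
          have hv2 : ("[" :: a ++ "," :: b ++ ["]"]).getD (j + 1 + 2) "" = a.getD (j + 2) "" := by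
            rw [List.getD_append _ _ _ _ (by simp; omega),
              List.getD_append _ _ _ _ (by simp; omega),
              show j + 1 + 2 = (j + 2) + 1 from rfl, List.getD_cons_succ]
          rw [hv1, hv2] at hp
          exact hnpa j hj (by omega) hp

-- A does one contraction step on a decomposed list
theorem pvLoopA_step (fuel : Nat) (l : List String) (d1 d2 : String) (r : List String)
    (h1 : pvDig d1 = true) (h2 : pvDig d2 = true)
    (hnpb : pvNPB (l ++ "[" :: d1 :: "," :: d2 :: "]" :: r) (l.length + 1)) :
    pvLoopA (fuel + 1) (l ++ "[" :: d1 :: "," :: d2 :: "]" :: r) =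
      pvLoopA fuel (l ++ PySem.Int.toStr (3 * pvVal d1 + 2 * pvVal d2) :: r) := by
  set s := l ++ "[" :: d1 :: "," :: d2 :: "]" :: r with hs
  have hscan : pvScan3 s = some (l.length + 1) := by
    have hdec : s = (l ++ ["["]) ++ d1 :: "," :: d2 :: ("]" :: r) := by rw [hs]; simp
    have := pvScan3_of_decomp (l ++ ["["]) s d1 "," d2 ("]" :: r) hdec h1 h2
      (by simpa using hnpb)
    simpa using this
  have hfind := pvFind_eq_scan3 s 0 s (by simp)
  rw [hscan] at hfind
  simp only [Nat.cast_zero, Nat.zero_add, Option.map_some] at hfind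
  have hga : s.getD (l.length + 1) "" = d1 := by
    rw [hs, List.getD_append_right _ _ _ _ (by omega),
      show l.length + 1 - l.length = 1 from by omega]
    rfl
  have hgd2 : PySem.List.pyGet? s ((((l.length + 1 : Nat)) : Int) + 2) = some d2 := by
    rw [show ((((l.length + 1 : Nat)) : Int) + 2) = ((l.length + 3 : Nat) : Int) from by push_cast; ring,
      PySem.List.pyGet?_natCast, hs, List.getElem?_append_right (by omega),
      show l.length + 3 - l.length = 3 from by omega]
    rfl
  simp only [pvLoopA]
  rw [hfind]
  simp only [hga, hgd2, Option.getD_some]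
  have hsl1 : PySem.List.slice s none (some ((((l.length + 1 : Nat)) : Int) - 1)) = l := by
    rw [show ((((l.length + 1 : Nat)) : Int) - 1) = ((l.length : Nat) : Int) from by push_cast; ring,
      PySem.List.slice_to_natCast, hs, List.take_left]
  have hsl2 : PySem.List.slice s (some ((((l.length + 1 : Nat)) : Int) + 4)) none = r := by
    rw [show ((((l.length + 1 : Nat)) : Int) + 4) = ((l.length + 5 : Nat) : Int) from by push_cast; ring,
      PySem.List.slice_from_natCast, hs,
      show l ++ "[" :: d1 :: "," :: d2 :: "]" :: r = (l ++ ["[", d1, ",", d2, "]"]) ++ r from by simp,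
      List.drop_left' (by simp)]
  rw [hsl1, hsl2, show pvVal d1 * 3 + pvVal d2 * 2 = 3 * pvVal d1 + 2 * pvVal d2 from by ring]
  congr 1
  simp

theorem pvStepB_push (stack : List String) (tok : String) (h : tok ≠ "]") :
    pvStepB stack tok = stack ++ [tok] := by
  simp only [pvStepB]
  rw [if_neg]
  intro hcc
  simp only [Bool.and_eq_true, beq_iff_eq] at hcc
  apply h
  have hg : pvG (stack ++ [tok]) (-1) = tok := by
    unfold pvG
    rw [PySem.List.pyGet?_neg_one_append_singleton]
    rfl
  rw [← hg]
  exact hcc.2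

theorem pvG_append_right (F : List String) (p : List String) (j : Nat) (_hj : j < p.length) :
    (F ++ p)[F.length + j]? = p[j]? := by
  rw [List.getElem?_append_right (by omega)]
  congr 1
  omega

theorem pvStepB_collapse (F : List String) (d1 d2 : String) (h1 : pvDig d1 = true) (h2 : pvDig d2 = true) :
    pvStepB (F ++ ["[", d1, ",", d2]) "]" =
      F ++ [PySem.Int.toStr (3 * pvVal d1 + 2 * pvVal d2)] := by
  simp only [pvStepB]
  have hre : F ++ ["[", d1, ",", d2] ++ ["]"] = F ++ ["[", d1, ",", d2, "]"] := by simp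
  rw [hre]
  have hL : (F ++ ["[", d1, ",", d2, "]"]).length = F.length + 5 := by simp
  have hg : ∀ (k j : Nat), k ≤ 5 → 0 < k → F.length + 5 - k = F.length + j → j < 5 →
      pvG (F ++ ["[", d1, ",", d2, "]"]) (-(k : Int)) = ["[", d1, ",", d2, "]"].getD j "" := by
    intro k j hk hk0 hkj hj
    unfold pvG
    rw [PySem.List.pyGet?_neg_natCast _ k hk0 (by omega), hL, hkj, pvG_append_right _ _ j (by simpa using hj)]
    simp [List.getD_eq_getElem?_getD]
  have hg5 := hg 5 0 (by omega) (by omega) (by omega) (by omega)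
  have hg4 := hg 4 1 (by omega) (by omega) (by omega) (by omega)
  have hg3 := hg 3 2 (by omega) (by omega) (by omega) (by omega)
  have hg2 := hg 2 3 (by omega) (by omega) (by omega) (by omega)
  have hg1 := hg 1 4 (by omega) (by omega) (by omega) (by omega)
  rw [show (-5 : Int) = -((5 : Nat) : Int) from by norm_num, show (-4 : Int) = -((4 : Nat) : Int) from by norm_num,
    show (-3 : Int) = -((3 : Nat) : Int) from by norm_num, show (-2 : Int) = -((2 : Nat) : Int) from by norm_num,
    show (-1 : Int) = -((1 : Nat) : Int) from by norm_num]
  rw [hg5, hg4, hg3, hg2, hg1]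
  rw [if_pos (by simp [hL, h1, h2])]
  rw [show (-((5 : Nat) : Int)) = (-5 : Int) from by norm_num,
    PySem.List.slice_to_neg_ofNat _ 5 (by omega), hL]
  rw [show F.length + 5 - 5 = F.length from by omega, List.take_left]
  rfl

theorem pvFoldB_contract (F : List String) (d1 d2 : String) (r : List String)
    (h1 : pvDig d1 = true) (h2 : pvDig d2 = true) :
    List.foldl pvStepB F ("[" :: d1 :: "," :: d2 :: "]" :: r) =
      List.foldl pvStepB F (PySem.Int.toStr (3 * pvVal d1 + 2 * pvVal d2) :: r) := by
  have hm : 0 ≤ 3 * pvVal d1 + 2 * pvVal d2 := by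
    have := pvVal_nonneg _ h1
    have := pvVal_nonneg _ h2
    omega
  simp only [List.foldl_cons]
  rw [pvStepB_push F "[" (by decide),
    pvStepB_push _ d1 (pvDig_ne d1 h1).2.2,
    pvStepB_push _ "," (by decide),
    pvStepB_push _ d2 (pvDig_ne d2 h2).2.2,
    show F ++ ["["] ++ [d1] ++ [","] ++ [d2] = F ++ ["[", d1, ",", d2] from by simp,
    pvStepB_collapse F d1 d2 h1 h2,
    pvStepB_push F (PySem.Int.toStr (3 * pvVal d1 + 2 * pvVal d2)) (fun he => by
      have hdg := pvDig_toStr _ hm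
      rw [he] at hdg
      exact absurd hdg (by decide))]

theorem pvFoldB_id : ∀ (t p : List String), pvHasPair (p ++ t) = false →
    List.foldl pvStepB p t = p ++ t := by
  intro t
  induction t with
  | nil => intro p _; simp
  | cons x t' ih =>
    intro p h
    have hassoc : p ++ x :: t' = (p ++ [x]) ++ t' := by simp
    have hstep : pvStepB p x = p ++ [x] := by
      simp only [pvStepB]
      rw [if_neg]
      intro hcc
      simp only [Bool.and_eq_true, beq_iff_eq, decide_eq_true_eq] at hcc
      obtain ⟨⟨⟨⟨⟨hn, _⟩, hd4⟩, _⟩, hd2⟩, _⟩ := hcc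
      have hL : (p ++ [x]).length = p.length + 1 := by simp
      have e4 : pvG (p ++ [x]) (-4) = (p ++ [x]).getD ((p ++ [x]).length - 4) "" := by
        unfold pvG
        rw [PySem.List.pyGet?_neg_ofNat _ 4 (by omega) (by omega)]
        simp [List.getD_eq_getElem?_getD]
      have e2 : pvG (p ++ [x]) (-2) = (p ++ [x]).getD ((p ++ [x]).length - 2) "" := by
        unfold pvG
        rw [PySem.List.pyGet?_neg_ofNat _ 2 (by omega) (by omega)]
        simp [List.getD_eq_getElem?_getD]
      have hpair : pvHasPair (p ++ x :: t') = true := by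
        rw [pvHasPair_iff]
        refine ⟨(p ++ [x]).length - 4, by simp at hn ⊢; omega, ?_, ?_⟩
        · rw [hassoc, List.getD_append _ _ _ _ (by omega)]
          rw [e4] at hd4
          exact hd4
        · rw [hassoc, show (p ++ [x]).length - 4 + 2 = (p ++ [x]).length - 2 from by omega,
            List.getD_append _ _ _ _ (by omega)]
          rw [e2] at hd2
          exact hd2
      rw [hpair] at h
      exact absurd h (by decide)
    rw [List.foldl_cons, hstep, ih (p ++ [x]) (by rwa [← hassoc]), hassoc]

-- main lemma on SF inputs
theorem pvMain : ∀ (fuel : Nat) (s : List String), pvSF s → s.length ≤ fuel →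
    pvLoopA fuel s = List.foldl pvStepB [] s := by
  intro fuel
  induction fuel with
  | zero =>
    intro s hsf hlen
    rcases pvSF_head s hsf with ⟨d, rfl, _⟩ | ⟨t, rfl⟩ <;> simp at hlen
  | succ f ih =>
    intro s hsf hlen
    rcases pvSF_cases s hsf with ⟨d, rfl, hd⟩ | ⟨l, d1, d2, r, rfl, h1, h2, hsf', hnpb⟩
    · have hfind := pvFind_eq_scan3 [d] 0 [d] (by simp)
      rw [pvScan3_short [d] (by simp)] at hfind
      simp only [Option.map_none, Nat.cast_zero] at hfind
      simp only [pvLoopA]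
      rw [hfind]
      have : pvStepB [] d = [] ++ [d] := by
        simp only [pvStepB]
        rw [if_neg]
        intro hcc
        simp only [Bool.and_eq_true, decide_eq_true_eq] at hcc
        have := hcc.1.1.1.1.1
        simp at this
      simp only [List.foldl_cons, List.foldl_nil, this]
      simp
    · have hstep := pvLoopA_step f l d1 d2 r h1 h2 hnpb
      rw [hstep, ih _ hsf' (by simp at hlen ⊢; omega)]
      rw [List.foldl_append, List.foldl_append,
        pvFoldB_contract (List.foldl pvStepB [] l) d1 d2 r h1 h2]

-- ===== VERDICT (by name: the statement is the Claim_ definition above) =====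
theorem check_magnitude_spec : Claim_equal_check_magnitude := by
  intro snail _ hpre
  unfold Spec_check_magnitude check_magnitude check_magnitude_alt
  rcases hpre with hwf | hnp
  · obtain ⟨e, hsf, he⟩ := pvParse_sound _ snail [] hwf
    rw [List.append_nil] at he
    subst he
    exact pvMain (snail.length + 1) snail hsf (by omega)
  · have hfind := pvFind_eq_scan3 snail 0 snail (by simp)
    rw [pvScan3_none snail hnp] at hfind
    simp only [Option.map_none, Nat.cast_zero] at hfind
    rw [pvFoldB_id snail [] (by simpa using hnp)]
    simp only [pvLoopA]
    rw [hfind]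
    simp
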